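-- pv_equiv track=rewrite | github.com/pmcarlton/circoscontacts | chimerax_circoscontacts/src/cmd.py | _active_ranges_from_maps
-- ===== SOURCE A (Python) =====
-- from typing import Dict, Iterable, List, Set, Tuple
--
-- def _to_ranges(values: Iterable[int]) -> List[Tuple[int, int]]:
--     nums = sorted(set(values))
--     if not nums:
--         return []
--     ranges: List[Tuple[int, int]] = []
--     start = prev = nums[0]
--     for value in nums[1:]:
--         if value == prev + 1:
--             prev = value
--             continue
--         ranges.append((start, prev))
--         start = prev = value
--     ranges.append((start, prev))
--     return ranges
--
-- def _active_ranges_from_maps(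
--     active_chain_resnums: Dict[str, Set[int]],
--     pos_map: Dict[str, Dict[int, int]],
--     display_chain_of: Dict[str, str],
-- ) -> Dict[str, List[Tuple[int, int]]]:
--     active_display: Dict[str, Set[int]] = {}
--     for source_chain, source_resnums in active_chain_resnums.items():
--         mapped = pos_map.get(source_chain, {})
--         display_chain = display_chain_of.get(source_chain, source_chain)
--         for resnum in source_resnums:
--             pos = mapped.get(resnum)
--             if pos is None:
--                 continue
--             active_display.setdefault(display_chain, set()).add(pos)
--     return {chain: _to_ranges(pos_set) for chain, pos_set in active_display.items()}
-- ===== SOURCE B (Python) =====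
-- from typing import Dict, Iterable, List, Set, Tuple
--
-- def _to_ranges(values: Iterable[int]) -> List[Tuple[int, int]]:
--     nums = sorted(set(values))
--     if not nums:
--         return []
--     pairs = list(zip(nums, nums[1:]))
--     starts = [nums[0]] + [b for a, b in pairs if b != a + 1]
--     ends = [a for a, b in pairs if b != a + 1] + [nums[-1]]
--     return list(zip(starts, ends))
--
-- def _active_ranges_from_maps(
--     active_chain_resnums: Dict[str, Set[int]],
--     pos_map: Dict[str, Dict[int, int]],
--     display_chain_of: Dict[str, str],
-- ) -> Dict[str, List[Tuple[int, int]]]: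
--     active_display: Dict[str, Set[int]] = {}
--     for source_chain, source_resnums in active_chain_resnums.items():
--         mapped = pos_map.get(source_chain, {})
--         display_chain = display_chain_of.get(source_chain, source_chain)
--         for resnum in source_resnums:
--             pos = mapped.get(resnum)
--             if pos is None:
--                 continue
--             active_display.setdefault(display_chain, set()).add(pos)
--     return {chain: _to_ranges(pos_set) for chain, pos_set in active_display.items()}
-- ===== Notes on version B (the rewrite author's own statement) =====
-- stated objective: idiomatic
-- what changed: _to_ranges drops the start/prev accumulator state machine and instead detects run boundaries by comparing each element with its successor (zip(nums, nums[1:])), building the start list and end list as comprehensions and zipping them into ranges; the mapping glue is unchanged.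
import Mathlib
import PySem

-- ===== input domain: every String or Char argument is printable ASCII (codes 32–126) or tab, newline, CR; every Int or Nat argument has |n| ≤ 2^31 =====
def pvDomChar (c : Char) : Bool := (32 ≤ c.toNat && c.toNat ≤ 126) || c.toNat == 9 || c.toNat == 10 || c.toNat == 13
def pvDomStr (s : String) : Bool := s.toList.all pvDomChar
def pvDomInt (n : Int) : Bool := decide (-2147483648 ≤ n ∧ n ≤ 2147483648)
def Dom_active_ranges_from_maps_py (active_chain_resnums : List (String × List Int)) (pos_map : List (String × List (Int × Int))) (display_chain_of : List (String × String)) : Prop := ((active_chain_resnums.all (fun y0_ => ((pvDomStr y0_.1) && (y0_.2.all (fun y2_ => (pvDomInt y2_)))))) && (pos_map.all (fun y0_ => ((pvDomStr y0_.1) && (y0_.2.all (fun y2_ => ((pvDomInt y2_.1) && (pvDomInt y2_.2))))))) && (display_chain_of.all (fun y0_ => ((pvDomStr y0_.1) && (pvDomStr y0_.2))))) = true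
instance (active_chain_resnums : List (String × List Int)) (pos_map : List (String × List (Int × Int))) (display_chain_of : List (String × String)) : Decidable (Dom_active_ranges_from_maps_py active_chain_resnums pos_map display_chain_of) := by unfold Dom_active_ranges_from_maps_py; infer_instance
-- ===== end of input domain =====

-- B replaces _to_ranges's start/prev state machine with successor-comparison comprehensions zipped into ranges (idiomatic; same cost); the mapping glue is unchanged.


-- ===== PORT A =====
-- _to_ranges: explicit start/prev state machine over sorted(set(values))
def pvLoopA (ranges : List (Int × Int)) (start prev : Int) : List Int → List (Int × Int)
  | [] => ranges ++ [(start, prev)]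
  | v :: rest =>
    if v = prev + 1 then pvLoopA ranges start v rest
    else pvLoopA (ranges ++ [(start, prev)]) v v rest

def pvToRanges (values : List Int) : List (Int × Int) :=
  match PySem.List.sorted (PySem.Set.ofList values) (fun x => x) false with
  | [] => []
  | n0 :: rest => pvLoopA [] n0 n0 rest

def active_ranges_from_maps_py (active_chain_resnums : List (String × List Int)) (pos_map : List (String × List (Int × Int))) (display_chain_of : List (String × String)) : List (String × List (Int × Int)) :=
  let pmD := PySem.Dict.ofList pos_map
  let dcoD := PySem.Dict.ofList display_chain_of
  let active_display :=
    (PySem.Dict.ofList active_chain_resnums).items.foldl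
      (fun d p =>
        let mapped := PySem.Dict.ofList (pmD.getD p.1 [])
        let dc := dcoD.getD p.1 p.1
        (PySem.Set.ofList p.2).foldl
          (fun d' r =>
            match mapped.get? r with
            | none => d'
            | some pos => d'.modify dc PySem.Set.empty (fun s => PySem.Set.add s pos))
          d)
      PySem.Dict.empty
  active_display.items.map (fun q => (q.1, pvToRanges q.2))

-- ===== PORT B =====
-- _to_ranges: run boundaries found by comparing each element with its successor; zip the starts with the ends
def pvToRangesAlt (values : List Int) : List (Int × Int) :=
  let nums := PySem.List.sorted (PySem.Set.ofList values) (fun x => x) false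
  if nums = [] then []
  else
    let pairs := nums.zip (PySem.List.slice nums (some 1) none)
    let starts := PySem.List.pyGetD nums 0 0 :: (pairs.filter (fun p => p.2 ≠ p.1 + 1)).map (·.2)
    let ends := (pairs.filter (fun p => p.2 ≠ p.1 + 1)).map (·.1) ++ [PySem.List.pyGetD nums (-1) 0]
    starts.zip ends

def active_ranges_from_maps_py_alt (active_chain_resnums : List (String × List Int)) (pos_map : List (String × List (Int × Int))) (display_chain_of : List (String × String)) : List (String × List (Int × Int)) :=
  let pmD := PySem.Dict.ofList pos_map
  let dcoD := PySem.Dict.ofList display_chain_of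
  let active_display :=
    (PySem.Dict.ofList active_chain_resnums).items.foldl
      (fun d p =>
        let mapped := PySem.Dict.ofList (pmD.getD p.1 [])
        let dc := dcoD.getD p.1 p.1
        (PySem.Set.ofList p.2).foldl
          (fun d' r =>
            match mapped.get? r with
            | none => d'
            | some pos => d'.modify dc PySem.Set.empty (fun s => PySem.Set.add s pos))
          d)
      PySem.Dict.empty
  active_display.items.map (fun q => (q.1, pvToRangesAlt q.2))

-- ===== PRECONDITION & SPEC =====
def Spec_active_ranges_from_maps_py (active_chain_resnums : List (String × List Int)) (pos_map : List (String × List (Int × Int))) (display_chain_of : List (String × String)) (out : List (String × List (Int × Int))) : Prop := out = active_ranges_from_maps_py_alt active_chain_resnums pos_map display_chain_of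
instance (active_chain_resnums : List (String × List Int)) (pos_map : List (String × List (Int × Int))) (display_chain_of : List (String × String)) (out : List (String × List (Int × Int))) : Decidable (Spec_active_ranges_from_maps_py active_chain_resnums pos_map display_chain_of out) := by unfold Spec_active_ranges_from_maps_py; infer_instance

-- ===== CLAIM (what is proved, stated in full; the proofs are below) =====
def Claim_equal_active_ranges_from_maps_py : Prop := ∀ (active_chain_resnums : List (String × List Int)) (pos_map : List (String × List (Int × Int))) (display_chain_of : List (String × String)), Dom_active_ranges_from_maps_py active_chain_resnums pos_map display_chain_of → Spec_active_ranges_from_maps_py active_chain_resnums pos_map display_chain_of (active_ranges_from_maps_py active_chain_resnums pos_map display_chain_of)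

-- ===== LEMMAS AND PROOFS =====
-- The maximal runs of consecutive integers of a list, grouped front-to-back.
def pvRuns : List Int → List (List Int)
  | [] => []
  | v :: rest =>
    match pvRuns rest with
    | (w :: g) :: gs => if w = v + 1 then (v :: w :: g) :: gs else [v] :: (w :: g) :: gs
    | gs => [v] :: gs

-- Each run contributes (first element, last element).
def pvEnds (gs : List (List Int)) : List (Int × Int) := gs.map (fun g => (g.headD 0, g.getLastD 0))

-- What A's loop appends after the accumulated ranges, in terms of the runs of the remaining input.
def pvGlue (start prev : Int) : List (List Int) → List (Int × Int)
  | (w :: g) :: gs =>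
    if w = prev + 1 then (start, (w :: g).getLastD 0) :: pvEnds gs
    else (start, prev) :: pvEnds ((w :: g) :: gs)
  | _ => [(start, prev)]

theorem pvRuns_cons (v : Int) (rest : List Int) : pvRuns (v :: rest) =
    match pvRuns rest with
    | (w :: g) :: gs => if w = v + 1 then (v :: w :: g) :: gs else [v] :: (w :: g) :: gs
    | gs => [v] :: gs := rfl

theorem pvRuns_cons_shape (v : Int) (rest : List Int) :
    ∃ g gs, pvRuns (v :: rest) = (v :: g) :: gs := by
  rw [pvRuns_cons]
  cases h : pvRuns rest with
  | nil => exact ⟨[], [], rfl⟩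
  | cons g0 gs0 =>
    cases g0 with
    | nil => exact ⟨[], [] :: gs0, rfl⟩
    | cons w g' =>
      by_cases hw : w = v + 1
      · exact ⟨w :: g', gs0, by simp [hw]⟩
      · exact ⟨[], (w :: g') :: gs0, by simp [hw]⟩

theorem pvLoopA_runs (rest : List Int) : ∀ (ranges : List (Int × Int)) (start prev : Int),
    pvLoopA ranges start prev rest = ranges ++ pvGlue start prev (pvRuns rest) := by
  induction rest with
  | nil => intro ranges start prev; simp [pvLoopA, pvRuns, pvGlue]
  | cons v rest' ih =>
    intro ranges start prev
    have key : pvGlue start prev (pvRuns (v :: rest')) =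
        if v = prev + 1 then pvGlue start v (pvRuns rest')
        else (start, prev) :: pvGlue v v (pvRuns rest') := by
      cases rest' with
      | nil =>
        by_cases hv : v = prev + 1
        · subst hv; simp [pvRuns, pvGlue, pvEnds]
        · simp [pvRuns, pvGlue, pvEnds, hv]
      | cons u rest2 =>
        obtain ⟨g, gs, hg⟩ := pvRuns_cons_shape u rest2
        have hrv : pvRuns (v :: u :: rest2) =
            if u = v + 1 then (v :: u :: g) :: gs else [v] :: (u :: g) :: gs := by
          rw [pvRuns_cons, hg]
        rw [hg, hrv]
        by_cases hu : u = v + 1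
        · subst hu
          by_cases hv : v = prev + 1
          · subst hv; simp [pvGlue, pvEnds]
          · simp [pvGlue, pvEnds, hv]
        · by_cases hv : v = prev + 1
          · subst hv; simp [pvGlue, pvEnds, hu]
          · simp [pvGlue, pvEnds, hu, hv]
    simp only [pvLoopA]
    by_cases hv : v = prev + 1
    · rw [if_pos hv, ih, key, if_pos hv]
    · rw [if_neg hv, ih, key, if_neg hv, List.append_assoc]
      simp

theorem pvLoopA_ends (v : Int) (rest : List Int) :
    pvLoopA [] v v rest = pvEnds (pvRuns (v :: rest)) := by
  rw [pvLoopA_runs, List.nil_append]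
  cases rest with
  | nil => simp [pvRuns, pvGlue, pvEnds]
  | cons u rest2 =>
    obtain ⟨g, gs, hg⟩ := pvRuns_cons_shape u rest2
    have hrv : pvRuns (v :: u :: rest2) =
        if u = v + 1 then (v :: u :: g) :: gs else [v] :: (u :: g) :: gs := by
      rw [pvRuns_cons, hg]
    rw [hg, hrv]
    by_cases hu : u = v + 1
    · subst hu; simp [pvGlue, pvEnds]
    · simp [pvGlue, pvEnds, hu]

theorem pvStarts_runs (rest : List Int) : ∀ v : Int,
    v :: (((v :: rest).zip rest).filter (fun p => p.2 ≠ p.1 + 1)).map (·.2) =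
      (pvRuns (v :: rest)).map (fun g => g.headD 0) := by
  induction rest with
  | nil => intro v; simp [pvRuns]
  | cons w rest2 ih =>
    intro v
    obtain ⟨g, gs, hg⟩ := pvRuns_cons_shape w rest2
    have hrv : pvRuns (v :: w :: rest2) =
        if w = v + 1 then (v :: w :: g) :: gs else [v] :: (w :: g) :: gs := by
      rw [pvRuns_cons, hg]
    have ih' := ih w
    rw [hg] at ih'
    simp only [List.map_cons, List.headD_cons, List.cons.injEq, true_and] at ih'
    rw [hrv]
    by_cases hw : w = v + 1
    · subst hw
      simp at ih' ⊢
      exact ih'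
    · simp [hw] at ih' ⊢
      exact ih'

theorem pvEnds_runs (rest : List Int) : ∀ v : Int,
    (((v :: rest).zip rest).filter (fun p => p.2 ≠ p.1 + 1)).map (·.1) ++ [(v :: rest).getLastD 0] =
      (pvRuns (v :: rest)).map (fun g => g.getLastD 0) := by
  induction rest with
  | nil => intro v; simp [pvRuns]
  | cons w rest2 ih =>
    intro v
    obtain ⟨g, gs, hg⟩ := pvRuns_cons_shape w rest2
    have hrv : pvRuns (v :: w :: rest2) =
        if w = v + 1 then (v :: w :: g) :: gs else [v] :: (w :: g) :: gs := by
      rw [pvRuns_cons, hg]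
    have ih' := ih w
    rw [hg] at ih'
    rw [hrv]
    by_cases hw : w = v + 1
    · subst hw
      simp [List.zip_cons_cons] at ih' ⊢
      simpa using ih'
    · simp [List.zip_cons_cons, hw] at ih' ⊢
      simp [ih']

theorem pvToRanges_eq (values : List Int) : pvToRanges values = pvToRangesAlt values := by
  unfold pvToRanges pvToRangesAlt
  cases h : PySem.List.sorted (PySem.Set.ofList values) (fun x => x) false with
  | nil => simp
  | cons v rest =>
    rw [if_neg (by simp)]
    rw [PySem.List.slice_from_one]
    simp only [List.tail_cons, PySem.List.pyGetD_zero_cons]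
    have hlast : PySem.List.pyGetD (v :: rest) (-1) 0 = (v :: rest).getLastD 0 := by
      rw [PySem.List.pyGetD_neg_one (v :: rest) 0 (by simp)]
      simp [List.getLastD_eq_getLast?, List.getLast?_eq_some_getLast (show v :: rest ≠ [] by simp)]
    rw [hlast, pvLoopA_ends, pvStarts_runs, pvEnds_runs]
    unfold pvEnds
    rw [List.zip_map']

-- ===== VERDICT (by name: the statement is the Claim_ definition above) =====
theorem active_ranges_from_maps_py_spec : Claim_equal_active_ranges_from_maps_py := by
  intro acr pm dco _
  unfold Spec_active_ranges_from_maps_py active_ranges_from_maps_py active_ranges_from_maps_py_alt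
  simp only [pvToRanges_eq]
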